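-- pv_equiv track=rewrite | github.com/aws-solutions-library-samples/guidance-for-a-multi-tenant-generative-ai-gateway-with-cost-and-usage-tracking-on-aws | lambdas/cost_tracking/utils.py | _is_in_model_list
-- ===== SOURCE A (Python) =====
-- def _is_in_model_list(model_id, model_list):
--     if model_id in model_list:
--         return True
--     else:
--         parts = model_id.split('.')
--         for i in range(len(parts), 0, -1):
--             partial_id = '.'.join(parts[-i:])
--             if partial_id in model_list:
--                 return True
--
--     return False
-- ===== SOURCE B (Python) =====
-- def _is_in_model_list(model_id, model_list):
--     for m in model_list:
--         if model_id == m or model_id.endswith('.' + m):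
--             return True
--     return False
-- ===== Notes on version B (the rewrite author's own statement) =====
-- stated objective: simpler
-- what changed: B makes one pass over model_list testing each candidate by equality or a dot-boundary endswith, instead of A's split of model_id into parts and enumeration of every dotted suffix via join plus a membership scan for each.
import Mathlib
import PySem

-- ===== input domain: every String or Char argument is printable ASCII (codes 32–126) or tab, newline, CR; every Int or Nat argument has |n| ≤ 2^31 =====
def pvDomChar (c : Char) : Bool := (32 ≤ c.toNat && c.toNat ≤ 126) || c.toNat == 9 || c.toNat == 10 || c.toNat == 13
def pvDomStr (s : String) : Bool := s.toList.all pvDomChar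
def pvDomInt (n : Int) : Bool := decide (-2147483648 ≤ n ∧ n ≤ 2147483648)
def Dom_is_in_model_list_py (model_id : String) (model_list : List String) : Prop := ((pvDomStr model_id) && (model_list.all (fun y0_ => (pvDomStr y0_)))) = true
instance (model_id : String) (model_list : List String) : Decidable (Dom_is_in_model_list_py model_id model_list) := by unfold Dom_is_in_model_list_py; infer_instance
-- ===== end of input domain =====

-- B replaces A's split/join enumeration of every dotted suffix of model_id by a single pass
-- over model_list testing equality or a '.'-boundary endswith (simpler; same result).

-- ===== PORT A =====
-- the for-loop over range(len(parts), 0, -1) with early return True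
def pvALoop (parts : List String) (model_list : List String) : List Int → Bool
  | [] => false
  | i :: rest =>
    if model_list.contains (PySem.Str.join "." (PySem.List.slice parts (some (-i)) none)) then true
    else pvALoop parts model_list rest

def is_in_model_list_py (model_id : String) (model_list : List String) : Bool :=
  if model_list.contains model_id then true
  else
    -- model_id.split('.'): sep "." is non-empty, so split? is always `some`; getD never fires
    let parts := (PySem.Str.split? model_id ".").getD []
    pvALoop parts model_list (PySem.List.pyRange (parts.length : Int) 0 (-1))

-- ===== PORT B =====
-- the for-loop over model_list with early return True
def pvBLoop (model_id : String) : List String → Bool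
  | [] => false
  | m :: rest =>
    if model_id == m || PySem.Str.endswith model_id ("." ++ m) then true
    else pvBLoop model_id rest

def is_in_model_list_py_alt (model_id : String) (model_list : List String) : Bool :=
  pvBLoop model_id model_list

-- ===== PRECONDITION & SPEC =====
def Spec_is_in_model_list_py (model_id : String) (model_list : List String) (out : Bool) : Prop := out = is_in_model_list_py_alt model_id model_list
instance (model_id : String) (model_list : List String) (out : Bool) : Decidable (Spec_is_in_model_list_py model_id model_list out) := by unfold Spec_is_in_model_list_py; infer_instance

-- ===== CLAIM (what is proved, stated in full; the proofs are below) =====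
def Claim_equal_is_in_model_list_py : Prop := ∀ (model_id : String) (model_list : List String), Dom_is_in_model_list_py model_id model_list → Spec_is_in_model_list_py model_id model_list (is_in_model_list_py model_id model_list)

-- ===== LEMMAS AND PROOFS =====

-- reference single-separator split, with plain structural equations
def pvSplit (c : Char) : List Char → List (List Char)
  | [] => [[]]
  | a :: l => if a = c then [] :: pvSplit c l else (pvSplit c l).modifyHead (a :: ·)

theorem pvSplit_ne_nil (c : Char) (l : List Char) : pvSplit c l ≠ [] := by
  induction l with
  | nil => simp [pvSplit]
  | cons a l ih =>
    simp only [pvSplit]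
    split_ifs
    · simp
    · intro h
      exact ih (List.eq_nil_of_length_eq_zero (by simpa using congrArg List.length h))

theorem pv_go_eq (c : Char) : ∀ (fuel : Nat) (l cur : List Char) (acc : List (List Char)),
    l.length < fuel →
    PySem.Chars.splitOn.go [c] fuel l cur acc
      = acc.reverse ++ (pvSplit c l).modifyHead (cur.reverse ++ ·) := by
  intro fuel
  induction fuel with
  | zero => intro l cur acc h; omega
  | succ fuel ih =>
    intro l cur acc h
    cases l with
    | nil =>
      rw [PySem.Chars.splitOn.go]
      simp [pvSplit]
      omega
    | cons ch rest =>
      have hrest : rest.length < fuel := by simp at h; omega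
      rw [PySem.Chars.splitOn.go]
      by_cases hc : c = ch
      · subst hc
        have hpre : [c].isPrefixOf (c :: rest) = true := by
          show ((c == c) && List.isPrefixOf [] rest) = true
          rw [beq_self_eq_true]
          rfl
        rw [if_pos hpre]
        rw [ih _ [] (cur.reverse :: acc) (by simpa using hrest)]
        cases hs : pvSplit c rest with
        | nil => exact absurd hs (pvSplit_ne_nil c rest)
        | cons p ps => simp [pvSplit, hs, List.modifyHead]
      · have hcb : (c == ch) = false := beq_eq_false_iff_ne.mpr hc
        have hpre : [c].isPrefixOf (ch :: rest) = false := by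
          show ((c == ch) && List.isPrefixOf [] rest) = false
          rw [hcb]
          rfl
        rw [if_neg (by simp [hpre])]
        rw [ih rest (ch :: cur) acc hrest]
        have hne : ¬ ch = c := fun h' => hc h'.symm
        cases hs : pvSplit c rest with
        | nil => exact absurd hs (pvSplit_ne_nil c rest)
        | cons p ps =>
          simp [pvSplit, hs, hne, List.modifyHead]

theorem pv_splitOn_single (c : Char) (l : List Char) :
    PySem.Chars.splitOn l [c] = pvSplit c l := by
  unfold PySem.Chars.splitOn
  rw [pv_go_eq c (l.length + 1) l [] [] (Nat.lt_succ_self _)]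
  cases hs : pvSplit c l with
  | nil => exact absurd hs (pvSplit_ne_nil c l)
  | cons p ps => simp [List.modifyHead]

theorem pv_join_split (c : Char) (l : List Char) :
    PySem.Chars.join [c] (pvSplit c l) = l := by
  induction l with
  | nil => simp [pvSplit, PySem.Chars.join_singleton]
  | cons a l ih =>
    simp only [pvSplit]
    split_ifs with hc
    · subst hc
      cases hs : pvSplit a l with
      | nil => exact absurd hs (pvSplit_ne_nil a l)
      | cons q qs =>
        rw [hs] at ih
        rw [PySem.Chars.join_cons_cons, ih]
        rfl
    · cases hs : pvSplit c l with
      | nil => exact absurd hs (pvSplit_ne_nil c l)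
      | cons q qs =>
        rw [hs] at ih
        cases qs with
        | nil =>
          simp only [List.modifyHead]
          rw [PySem.Chars.join_singleton] at ih ⊢
          simp [ih]
        | cons q' qs' =>
          simp only [List.modifyHead]
          rw [PySem.Chars.join_cons_cons] at ih
          rw [PySem.Chars.join_cons_cons]
          simp [ih.symm]

theorem pv_suffix_of_drop (c : Char) (l : List Char) :
    ∀ j, 0 < j → j < (pvSplit c l).length →
      (c :: PySem.Chars.join [c] ((pvSplit c l).drop j)) <:+ l := by
  induction l with
  | nil => intro j hj hlen; simp [pvSplit] at hlen; omega
  | cons a l ih =>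
    intro j hj hlen
    simp only [pvSplit] at hlen ⊢
    split_ifs with hc
    · subst hc
      cases j with
      | zero => omega
      | succ j' =>
        simp only [List.drop_succ_cons]
        cases Nat.eq_zero_or_pos j' with
        | inl h0 =>
          subst h0
          rw [List.drop_zero, pv_join_split]
        | inr hpos =>
          have hlt : j' < (pvSplit a l).length := by
            simp at hlen; omega
          exact (ih j' hpos hlt).trans (List.suffix_cons a l)
    · cases hs : pvSplit c l with
      | nil => exact absurd hs (pvSplit_ne_nil c l)
      | cons q qs =>
        rw [hs] at hlen ih
        rw [if_neg hc] at hlen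
        simp only [List.length_modifyHead] at hlen
        cases j with
        | zero => omega
        | succ j' =>
          simp only [List.modifyHead, List.drop_succ_cons]
          have := ih (j' + 1) (Nat.succ_pos _) (by simpa using hlen)
          simp only [List.drop_succ_cons] at this
          exact this.trans (List.suffix_cons a l)

theorem pv_drop_of_suffix (c : Char) (l : List Char) :
    ∀ t, (c :: t) <:+ l →
      ∃ j, 0 < j ∧ j < (pvSplit c l).length ∧
        PySem.Chars.join [c] ((pvSplit c l).drop j) = t := by
  induction l with
  | nil =>
    intro t ht
    rcases ht with ⟨p, hp⟩
    exact absurd hp (by simp)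
  | cons a l ih =>
    intro t ht
    rcases List.suffix_cons_iff.mp ht with heq | hsuf
    · -- c :: t = a :: l, so a = c and t = l
      injection heq with h1 h2
      subst h1
      subst h2
      refine ⟨1, Nat.one_pos, ?_, ?_⟩
      · have := List.length_pos_iff.mpr (pvSplit_ne_nil c t)
        simp [pvSplit]
        omega
      · simp [pvSplit]
        exact pv_join_split c t
    · rcases ih t hsuf with ⟨j, hj0, hjlen, hjoin⟩
      by_cases hc : a = c
      · subst hc
        refine ⟨j + 1, Nat.succ_pos _, ?_, ?_⟩
        · simp [pvSplit]; omega
        · simp [pvSplit]; exact hjoin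
      · cases hs : pvSplit c l with
        | nil => exact absurd hs (pvSplit_ne_nil c l)
        | cons q qs =>
          rw [hs] at hjlen hjoin
          refine ⟨j, hj0, ?_, ?_⟩
          · simp only [pvSplit, if_neg hc, hs, List.modifyHead, List.length_cons]
            simpa using hjlen
          · simp only [pvSplit, if_neg hc, hs, List.modifyHead]
            cases j with
            | zero => omega
            | succ j' => simpa using hjoin

-- full characterisation of A's candidate set
theorem pv_key (c : Char) (l : List Char) (t : List Char) :
    (∃ j, j < (pvSplit c l).length ∧ PySem.Chars.join [c] ((pvSplit c l).drop j) = t)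
      ↔ (t = l ∨ (c :: t) <:+ l) := by
  constructor
  · rintro ⟨j, hj, rfl⟩
    cases Nat.eq_zero_or_pos j with
    | inl h0 => subst h0; left; rw [List.drop_zero, pv_join_split]
    | inr hpos => right; exact pv_suffix_of_drop c l j hpos hj
  · rintro (rfl | hsuf)
    · exact ⟨0, List.length_pos_iff.mpr (pvSplit_ne_nil c t), by rw [List.drop_zero, pv_join_split]⟩
    · rcases pv_drop_of_suffix c l t hsuf with ⟨j, _, hjlen, hjoin⟩
      exact ⟨j, hjlen, hjoin⟩

theorem pvALoop_eq_any (parts model_list : List String) (r : List Int) :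
    pvALoop parts model_list r
      = r.any (fun i => model_list.contains (PySem.Str.join "." (PySem.List.slice parts (some (-i)) none))) := by
  induction r with
  | nil => rfl
  | cons i rest ih =>
    rw [List.any_cons]
    show (if _ then true else _) = _
    cases model_list.contains (PySem.Str.join "." (PySem.List.slice parts (some (-i)) none)) <;>
      simp [ih]

theorem pvBLoop_eq_any (model_id : String) (l : List String) :
    pvBLoop model_id l
      = l.any (fun m => model_id == m || PySem.Str.endswith model_id ("." ++ m)) := by
  induction l with
  | nil => rfl
  | cons m rest ih =>
    rw [List.any_cons]
    show (if _ then true else _) = _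
    cases (model_id == m || PySem.Str.endswith model_id ("." ++ m)) <;>
      simp [ih]

-- the parts list of A, as Chars
theorem pv_parts_eq (model_id : String) :
    ∃ parts : List String,
      (PySem.Str.split? model_id ".").getD [] = parts ∧
      parts.map String.toList = pvSplit '.' model_id.toList := by
  have h := PySem.Str.split?_map model_id "."
  have hsep : (".").toList = ['.'] := rfl
  rw [hsep] at h
  simp only [PySem.Chars.split?, List.isEmpty_cons] at h
  rw [pv_splitOn_single] at h
  cases hsp : PySem.Str.split? model_id "." with
  | none => rw [hsp] at h; simp at h
  | some parts =>
    rw [hsp] at h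
    simp only [Option.map_some] at h
    exact ⟨parts, by simp, by simpa using h⟩

-- join of a drop of the parts, bridged to Chars
theorem pv_join_drop (model_id : String) (parts : List String)
    (hmap : parts.map String.toList = pvSplit '.' model_id.toList) (j : Nat) :
    (PySem.Str.join "." (parts.drop j)).toList
      = PySem.Chars.join ['.'] ((pvSplit '.' model_id.toList).drop j) := by
  rw [PySem.Str.toList_join, ← hmap, ← List.map_drop]
  rfl

-- ===== VERDICT (by name: the statement is the Claim_ definition above) =====
theorem is_in_model_list_py_spec : Claim_equal_is_in_model_list_py := by
  intro model_id model_list _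
  unfold Spec_is_in_model_list_py is_in_model_list_py is_in_model_list_py_alt
  rcases pv_parts_eq model_id with ⟨parts, hparts, hmap⟩
  simp only [hparts]
  have hlen : parts.length = (pvSplit '.' model_id.toList).length := by
    rw [← hmap, List.length_map]
  have hB : pvBLoop model_id model_list = true
      ↔ ∃ m ∈ model_list, (model_id = m ∨ ('.' :: m.toList) <:+ model_id.toList) := by
    rw [pvBLoop_eq_any, List.any_eq_true]
    simp [PySem.Str.endswith_eq, PySem.Chars.endswith_iff, String.toList_append,
      show (".".toList) = ['.'] from rfl]
  have hA : (if model_list.contains model_id then true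
        else pvALoop parts model_list (PySem.List.pyRange (parts.length : Int) 0 (-1))) = true
      ↔ (model_id ∈ model_list ∨
          ∃ j, j < parts.length ∧ PySem.Str.join "." (parts.drop j) ∈ model_list) := by
    split_ifs with h
    · simp [List.contains_iff_mem.mp h]
    · rw [pvALoop_eq_any]
      simp only [List.any_eq_true]
      have hnot : ¬ model_id ∈ model_list := fun hm => h (List.contains_iff_mem.mpr hm)
      constructor
      · rintro ⟨i, hiR, hcon⟩
        right
        rcases PySem.List.mem_pyRange_neg_one.mp hiR with ⟨h0, hn⟩
        obtain ⟨k, rfl⟩ : ∃ k : Nat, i = (k : Int) :=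
          ⟨i.toNat, (Int.toNat_of_nonneg (le_of_lt h0)).symm⟩
        have hk0 : 0 < k := by exact_mod_cast h0
        have hkn : k ≤ parts.length := by exact_mod_cast hn
        refine ⟨parts.length - k, by omega, ?_⟩
        rw [PySem.List.slice_from_neg_natCast parts k hk0] at hcon
        exact List.contains_iff_mem.mp hcon
      · rintro (hm | ⟨j, hj, hin⟩)
        · exact absurd hm hnot
        · refine ⟨((parts.length - j : Nat) : Int), ?_, ?_⟩
          · exact PySem.List.mem_pyRange_neg_one.mpr
              ⟨by exact_mod_cast Nat.sub_pos_of_lt hj, by exact_mod_cast Nat.sub_le _ _⟩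
          · rw [PySem.List.slice_from_neg_natCast parts _ (Nat.sub_pos_of_lt hj)]
            have hjj : parts.length - (parts.length - j) = j := by omega
            rw [hjj]
            exact List.contains_iff_mem.mpr hin
  rw [Bool.eq_iff_iff, hA, hB]
  constructor
  · rintro (hm | ⟨j, hj, hin⟩)
    · exact ⟨model_id, hm, Or.inl rfl⟩
    · have hst := pv_join_drop model_id parts hmap j
      rcases (pv_key '.' model_id.toList (PySem.Str.join "." (parts.drop j)).toList).mp
          ⟨j, by rw [← hlen]; exact hj, hst.symm⟩ with hcs | hsuf
      · exact ⟨_, hin, Or.inl (String.toList_inj.mp hcs).symm⟩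
      · exact ⟨_, hin, Or.inr hsuf⟩
  · rintro ⟨m, hm, (rfl | hsuf)⟩
    · exact Or.inl hm
    · right
      rcases (pv_key '.' model_id.toList m.toList).mpr (Or.inr hsuf) with ⟨j, hj, hjn⟩
      refine ⟨j, by rw [hlen]; exact hj, ?_⟩
      have hstr : (PySem.Str.join "." (parts.drop j)).toList = m.toList := by
        rw [pv_join_drop model_id parts hmap j, hjn]
      rw [String.toList_inj.mp hstr]
      exact hm
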